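-- pv_equiv track=rewrite | github.com/syurskyi/Python_Topics | 125_algorithms/_examples/_algorithms_challenges/pybites/beginner/beginner-bite-225-swap-case-pybites-characters.py | convert_pybites_chars
-- ===== SOURCE A (Python) =====
-- PYBITES = "pybites"
--
-- def convert_pybites_chars(text):
--     """Swap case all characters in the word pybites for the given text.
--        Return the resulting string."""
--     output = ''
--     for char in text:
--         if char.lower() in PYBITES:
--             if char.isupper():
--                 output += output.join(char.lower())
--             else:
--                 output += output.join(char.upper())
--         else:
--             output += output.join(char)
--     return output
-- ===== SOURCE B (Python) =====
-- PYBITES = "pybites"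
--
-- _TABLE = str.maketrans("pybitesPYBITES", "PYBITESpybites")
--
-- def convert_pybites_chars(text):
--     """Swap case all characters in the word pybites for the given text.
--        Return the resulting string."""
--     return text.translate(_TABLE)
-- ===== Notes on version B (the rewrite author's own statement) =====
-- stated objective: idiomatic
-- what changed: Replaces the explicit character loop with branch logic by a one-time str.maketrans swap-case table for the pybites letters and a single text.translate call.
import Mathlib
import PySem

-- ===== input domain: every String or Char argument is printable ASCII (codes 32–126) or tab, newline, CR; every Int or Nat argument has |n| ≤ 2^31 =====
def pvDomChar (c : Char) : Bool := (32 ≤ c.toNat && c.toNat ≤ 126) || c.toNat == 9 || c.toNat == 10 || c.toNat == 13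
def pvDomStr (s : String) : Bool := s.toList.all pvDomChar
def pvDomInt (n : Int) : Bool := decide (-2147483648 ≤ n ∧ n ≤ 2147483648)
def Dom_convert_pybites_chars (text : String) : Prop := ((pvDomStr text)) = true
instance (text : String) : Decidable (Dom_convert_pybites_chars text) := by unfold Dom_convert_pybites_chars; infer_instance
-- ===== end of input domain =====

-- B builds a 14-entry swap-case translation table once (str.maketrans) and maps the
-- string through it in one translate call, instead of A's per-character branch loop (idiomatic).

-- ===== PORT A =====
-- A's `output += output.join(char)` appends exactly `char` (join over a 1-char string
-- ignores the separator), so each branch appends one character to `output`.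
def convert_pybites_chars (text : String) : String :=
  String.mk (text.toList.foldl (fun output char =>
    if PySem.Chars.isIn [PySem.Chars.lowerChar char] "pybites".toList then
      if PySem.Chars.isupper char then output ++ [PySem.Chars.lowerChar char]
      else output ++ [PySem.Chars.upperChar char]
    else output ++ [char]) [])

-- ===== PORT B =====
-- str.maketrans("pybitesPYBITES", "PYBITESpybites") as an association table
def pvSwapTable : PySem.Dict Char Char :=
  PySem.Dict.ofList (List.zip "pybitesPYBITES".toList "PYBITESpybites".toList)

-- text.translate(table): each character is replaced by its table entry, or kept
def convert_pybites_chars_alt (text : String) : String :=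
  String.mk (text.toList.map (fun c => (pvSwapTable.get? c).getD c))

-- ===== PRECONDITION & SPEC =====
def Spec_convert_pybites_chars (text : String) (out : String) : Prop := out = convert_pybites_chars_alt text
instance (text : String) (out : String) : Decidable (Spec_convert_pybites_chars text out) := by unfold Spec_convert_pybites_chars; infer_instance

-- ===== CLAIM (what is proved, stated in full; the proofs are below) =====
def Claim_equal_convert_pybites_chars : Prop := ∀ (text : String), Dom_convert_pybites_chars text → Spec_convert_pybites_chars text (convert_pybites_chars text)

-- ===== LEMMAS AND PROOFS =====

-- A's per-character result, abstracted out of the loop for the proof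
def pvStepA (char : Char) : Char :=
  if PySem.Chars.isIn [PySem.Chars.lowerChar char] "pybites".toList then
    if PySem.Chars.isupper char then PySem.Chars.lowerChar char
    else PySem.Chars.upperChar char
  else char

lemma pvFoldl_eq_map (l acc : List Char) :
    l.foldl (fun output char =>
      if PySem.Chars.isIn [PySem.Chars.lowerChar char] "pybites".toList then
        if PySem.Chars.isupper char then output ++ [PySem.Chars.lowerChar char]
        else output ++ [PySem.Chars.upperChar char]
      else output ++ [char]) acc = acc ++ l.map pvStepA := by
  induction l generalizing acc with
  | nil => simp
  | cons c t ih =>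
    simp only [List.foldl_cons, List.map_cons, ih, pvStepA]
    split_ifs <;> simp

set_option maxRecDepth 8192 in
lemma pvStep_agree : ∀ n : Nat, n < 128 →
    pvStepA (Char.ofNat n) = ((pvSwapTable.get? (Char.ofNat n)).getD (Char.ofNat n)) := by
  decide

theorem convert_pybites_chars_spec_aux (text : String) (h : Dom_convert_pybites_chars text) :
    convert_pybites_chars text = convert_pybites_chars_alt text := by
  unfold convert_pybites_chars convert_pybites_chars_alt
  rw [pvFoldl_eq_map]
  simp only [List.nil_append]
  congr 1
  apply List.map_congr_left
  intro c hc
  have hd : pvDomChar c = true := by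
    unfold Dom_convert_pybites_chars pvDomStr at h
    exact List.all_eq_true.mp h c hc
  have hn : c.toNat < 128 := by
    unfold pvDomChar at hd
    simp only [Bool.or_eq_true, Bool.and_eq_true, decide_eq_true_eq, beq_iff_eq] at hd
    omega
  have := pvStep_agree c.toNat hn
  rwa [Char.ofNat_toNat] at this

-- ===== VERDICT (by name: the statement is the Claim_ definition above) =====
theorem convert_pybites_chars_spec : Claim_equal_convert_pybites_chars := by
  intro text h
  exact convert_pybites_chars_spec_aux text h
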